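-- pv_equiv track=rewrite | github.com/EricMartinezLabrin/cuentasmexico | index/views_ai_chat.py | _history_looks_business
-- ===== SOURCE A (Python) =====
-- from typing import Any, Dict, List
--
-- def _safe_text(value: Any) -> str:
--     return (str(value or "")).strip()
--
-- def _looks_like_business_question(message: str) -> bool:
--     text = (message or "").lower()
--     hints = [
--         "cliente",
--         "clientes",
--         "venta",
--         "ventas",
--         "facturacion",
--         "facturación",
--         "ingreso",
--         "compras",
--         "comprar",
--         "sin comprar",
--         "inactivo",
--         "inactiva",
--         "dias sin",
--         "top",
--         "mejor cliente",
--         "ticket",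
--         "promedio",
--     ]
--     return any(token in text for token in hints)
--
-- def _history_looks_business(history: List[Dict[str, str]]) -> bool:
--     if not history:
--         return False
--     recent = history[-6:]
--     for item in recent:
--         if _looks_like_business_question(_safe_text(item.get("content"))):
--             return True
--     return False
-- ===== SOURCE B (Python) =====
-- from typing import Any, Dict, List
--
-- _HINTS = [
--     "cliente", "clientes", "venta", "ventas", "facturacion", "facturación",
--     "ingreso", "compras", "comprar", "sin comprar", "inactivo", "inactiva",
--     "dias sin", "top", "mejor cliente", "ticket", "promedio",
-- ]
--
-- def _history_looks_business(history: List[Dict[str, str]]) -> bool: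
--     # Join the recent texts with '\n' (a character in no hint), then scan once.
--     combined = "\n".join(
--         str(item.get("content") or "").strip().lower() for item in history[-6:]
--     )
--     return any(hint in combined for hint in _HINTS)
-- ===== Notes on version B (the rewrite author's own statement) =====
-- stated objective: simpler
-- what changed: Instead of an explicit loop over the recent items with an early return when one item's text matches a hint, B joins the stripped lowercased recent texts into one newline-separated string and does a single any() scan of the hints over it (newline occurs in no hint, so no cross-item matches arise).
import Mathlib
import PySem

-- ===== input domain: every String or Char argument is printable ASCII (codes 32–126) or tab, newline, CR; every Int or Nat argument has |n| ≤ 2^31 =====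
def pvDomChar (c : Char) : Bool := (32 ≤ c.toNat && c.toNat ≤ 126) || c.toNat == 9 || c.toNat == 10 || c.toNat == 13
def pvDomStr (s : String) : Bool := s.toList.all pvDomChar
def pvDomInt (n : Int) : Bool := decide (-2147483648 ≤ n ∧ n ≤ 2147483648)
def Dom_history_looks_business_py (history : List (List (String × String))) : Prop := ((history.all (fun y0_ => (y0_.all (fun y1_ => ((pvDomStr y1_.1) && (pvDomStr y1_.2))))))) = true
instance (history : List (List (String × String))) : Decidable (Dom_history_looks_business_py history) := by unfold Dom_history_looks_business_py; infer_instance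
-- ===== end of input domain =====

-- B replaces A's loop-with-early-return over the recent items by one newline-joined string
-- scanned once per hint (objective: simpler); equivalence proved on all inputs.

-- ===== PORT A =====
-- the module-level hint list of _looks_like_business_question
def pvHints : List String :=
  ["cliente", "clientes", "venta", "ventas", "facturacion", "facturación",
   "ingreso", "compras", "comprar", "sin comprar", "inactivo", "inactiva",
   "dias sin", "top", "mejor cliente", "ticket", "promedio"]

-- _safe_text(value) = str(value or "").strip(); for Optional[str] 'value or ""' is getD ""
def pvSafeText (v : Option String) : String :=
  PySem.Str.strip (v.getD "")

-- _looks_like_business_question(message): 'message or ""' is the identity on strings here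
def pvLooksLikeBusiness (message : String) : Bool :=
  let text := PySem.Str.lower message
  pvHints.any (fun token => PySem.Str.isIn token text)

-- the 'for item in recent: if …: return True' loop
def pvHistLoop : List (List (String × String)) → Bool
  | [] => false
  | item :: rest =>
      if pvLooksLikeBusiness (pvSafeText ((PySem.Dict.mk item).get? "content")) then true
      else pvHistLoop rest

def history_looks_business_py (history : List (List (String × String))) : Bool :=
  if history.isEmpty then false
  else pvHistLoop (PySem.List.slice history (some (-6)) none)

-- ===== PORT B =====
def history_looks_business_py_alt (history : List (List (String × String))) : Bool :=
  let combined := PySem.Str.join "\n"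
    ((PySem.List.slice history (some (-6)) none).map
      (fun item => PySem.Str.lower (PySem.Str.strip (((PySem.Dict.mk item).get? "content").getD ""))))
  pvHints.any (fun hint => PySem.Str.isIn hint combined)

-- ===== PRECONDITION & SPEC =====
def Spec_history_looks_business_py (history : List (List (String × String))) (out : Bool) : Prop := out = history_looks_business_py_alt history
instance (history : List (List (String × String))) (out : Bool) : Decidable (Spec_history_looks_business_py history out) := by unfold Spec_history_looks_business_py; infer_instance

-- ===== CLAIM (what is proved, stated in full; the proofs are below) =====
def Claim_equal_history_looks_business_py : Prop := ∀ (history : List (List (String × String))), Dom_history_looks_business_py history → Spec_history_looks_business_py history (history_looks_business_py history)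

-- ===== LEMMAS AND PROOFS =====

-- a pattern avoiding the separator character is an infix of `a ++ c :: b` iff it is an infix of a part
theorem pv_infix_append_sep {p a b : List Char} {c : Char} (hc : c ∉ p) :
    p <:+: (a ++ c :: b) ↔ p <:+: a ∨ p <:+: b := by
  constructor
  · rintro ⟨s, t, h⟩
    rcases (Nat.lt_or_ge a.length (s.length + p.length)).symm with h1 | h1
    · left
      have hsp : (s ++ p) <+: (a ++ c :: b) :=
        ⟨t, by simpa [List.append_assoc] using h⟩
      have hpa : (s ++ p) <+: a := by
        refine List.prefix_of_prefix_length_le hsp ⟨c :: b, rfl⟩ ?_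
        simpa using h1
      exact (show p <:+: s ++ p from ⟨s, [], by simp⟩).trans hpa.isInfix
    · rcases (Nat.lt_or_ge a.length s.length).symm with h2 | h2
      · -- a.length falls strictly inside p: the char at index a.length of both sides is c ∈ p
        exfalso
        have hg := congrArg (fun l => l[a.length]?) h
        simp only at hg
        rw [List.append_assoc, List.getElem?_append_right h2,
            List.getElem?_append_left (by omega),
            List.getElem?_append_right (le_refl a.length)] at hg
        simp at hg
        exact hc (List.mem_of_getElem? hg)
      · right
        have hlen : s.length + (p.length + t.length) = a.length + (b.length + 1) := by
          have := congrArg List.length h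
          simpa [List.length_append] using this
        have hsuf : (p ++ t) <:+ (a ++ c :: b) :=
          ⟨s, by simpa [List.append_assoc] using h⟩
        have hb : (p ++ t) <:+ b := by
          refine List.suffix_of_suffix_length_le hsuf ⟨a ++ [c], by simp⟩ ?_
          simp only [List.length_append]
          omega
        exact (show p <:+: p ++ t from ⟨[], t, by simp⟩).trans hb.isInfix
  · rintro (h | h)
    · exact h.trans ⟨[], c :: b, by simp⟩
    · exact h.trans ⟨a ++ [c], [], by simp⟩

-- a nonempty newline-free pattern is an infix of the '\n'-join iff it is an infix of a segment
theorem pv_infix_join_iff (p : List Char) (hp : p ≠ []) (hc : '\n' ∉ p) :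
    ∀ segs : List (List Char),
      (p <:+: PySem.Chars.join ['\n'] segs ↔ ∃ s ∈ segs, p <:+: s)
  | [] => by
    rw [PySem.Chars.join_nil]
    simp [List.infix_nil, hp]
  | [s] => by
    rw [PySem.Chars.join_singleton]
    simp
  | s :: s' :: rest => by
    rw [PySem.Chars.join_cons_cons]
    have : s ++ ['\n'] ++ PySem.Chars.join ['\n'] (s' :: rest)
        = s ++ '\n' :: PySem.Chars.join ['\n'] (s' :: rest) := by simp
    rw [this, pv_infix_append_sep hc, pv_infix_join_iff p hp hc (s' :: rest)]
    simp

-- A's loop is List.any of the per-item test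
theorem pv_histLoop_eq_any (l : List (List (String × String))) :
    pvHistLoop l
      = l.any (fun item => pvLooksLikeBusiness (pvSafeText ((PySem.Dict.mk item).get? "content"))) := by
  induction l with
  | nil => rfl
  | cons item rest ih =>
    simp only [pvHistLoop, ih, List.any_cons]
    split_ifs with h <;> simp [h]

-- every hint is nonempty and contains no newline
theorem pv_hints_ok : ∀ h ∈ pvHints, h.toList ≠ [] ∧ '\n' ∉ h.toList := by
  intro h hh
  simp only [pvHints, List.mem_cons, List.not_mem_nil, or_false] at hh
  rcases hh with rfl|rfl|rfl|rfl|rfl|rfl|rfl|rfl|rfl|rfl|rfl|rfl|rfl|rfl|rfl|rfl|rfl <;>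
    exact ⟨by decide, by decide⟩

-- both ports, on the same list of recent items, decide the same double existential
theorem pv_main (recent : List (List (String × String))) :
    pvHistLoop recent
      = pvHints.any (fun hint => PySem.Str.isIn hint
          (PySem.Str.join "\n" (recent.map
            (fun item => PySem.Str.lower (PySem.Str.strip
              (((PySem.Dict.mk item).get? "content").getD "")))))) := by
  rw [pv_histLoop_eq_any, Bool.eq_iff_iff]
  simp only [List.any_eq_true, pvLooksLikeBusiness, pvSafeText, PySem.Str.isIn_iff_infix]
  constructor
  · rintro ⟨item, hmem, hint, hhint, hin⟩
    refine ⟨hint, hhint, ?_⟩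
    rw [PySem.Str.toList_join, show "\n".toList = ['\n'] from rfl,
        pv_infix_join_iff _ (pv_hints_ok hint hhint).1 (pv_hints_ok hint hhint).2]
    exact ⟨_, by simp only [List.map_map]; exact List.mem_map_of_mem (l := recent) hmem, hin⟩
  · rintro ⟨hint, hhint, hin⟩
    rw [PySem.Str.toList_join, show "\n".toList = ['\n'] from rfl,
        pv_infix_join_iff _ (pv_hints_ok hint hhint).1 (pv_hints_ok hint hhint).2] at hin
    obtain ⟨s, hs, hinfix⟩ := hin
    simp only [List.map_map, List.mem_map] at hs
    obtain ⟨item, hmem, rfl⟩ := hs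
    exact ⟨item, hmem, hint, hhint, hinfix⟩

-- ===== VERDICT (by name: the statement is the Claim_ definition above) =====
theorem history_looks_business_py_spec : Claim_equal_history_looks_business_py := by
  intro history _
  show history_looks_business_py history = history_looks_business_py_alt history
  unfold history_looks_business_py history_looks_business_py_alt
  cases history with
  | nil =>
    rw [show PySem.List.slice ([] : List (List (String × String))) (some (-6)) none = []
          from by decide]
    exact pv_main []
  | cons x xs =>
    simp only [List.isEmpty_cons, if_neg Bool.false_ne_true]
    exact pv_main _
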